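-- pv_equiv track=rewrite | github.com/Fylybg0/AoC-2023 | 12/2.6.py | getFixed
-- ===== SOURCE A (Python) =====
-- def getFixed(x):
--     a, p, b = {}, 0, 0
--     for i in range(len(x)):
--         if x[i] == '#':
--             if p == 0:
--                 b = i
--             p += 1
--         if p != 0 and x[i] != '#':
--             a[b] = p
--             p = 0
--     if p != 0:
--         a[b] = p
--     return a
-- ===== SOURCE B (Python) =====
-- from itertools import groupby
--
-- def getFixed(x):
--     res = {}
--     i = 0
--     for k, g in groupby(x):
--         n = len(list(g))
--         if k == '#':
--             res[i] = n
--         i += n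
--     return res
-- ===== Notes on version B (the rewrite author's own statement) =====
-- stated objective: idiomatic
-- what changed: Replaces the per-character open-run flag and transition detection with an itertools.groupby run-oriented traversal that records (start, length) per maximal '#' group.
import Mathlib
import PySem

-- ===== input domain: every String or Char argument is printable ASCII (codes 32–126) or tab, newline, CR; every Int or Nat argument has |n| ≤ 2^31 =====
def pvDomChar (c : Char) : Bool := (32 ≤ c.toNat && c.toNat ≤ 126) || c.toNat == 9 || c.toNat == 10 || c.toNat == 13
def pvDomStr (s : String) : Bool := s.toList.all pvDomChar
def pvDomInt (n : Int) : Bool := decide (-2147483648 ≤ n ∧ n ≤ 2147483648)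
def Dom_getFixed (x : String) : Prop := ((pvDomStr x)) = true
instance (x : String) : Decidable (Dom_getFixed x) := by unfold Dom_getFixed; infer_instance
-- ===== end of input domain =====

-- B replaces A's per-character open-run flag loop with a run-oriented (groupby-style) traversal; same values, idiomatic decomposition.

-- ===== PORT A =====
-- the for-loop over range(len(x)) with state (a, p, b); i is the running index.
-- Python's two sequential ifs have mutually exclusive conditions (the second requires
-- x[i] != '#'), so they are ported as an if/elif chain over the same state.
def getFixedLoop : List Char → Int → PySem.Dict Int Int → Int → Int →
    PySem.Dict Int Int × Int × Int
  | [], _, a, p, b => (a, p, b)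
  | c :: rest, i, a, p, b =>
    if c = '#' then
      -- if x[i] == '#': (if p == 0: b = i); p += 1
      getFixedLoop rest (i + 1) a (p + 1) (if p = 0 then i else b)
    else if p ≠ 0 then
      -- if p != 0 and x[i] != '#': a[b] = p; p = 0
      getFixedLoop rest (i + 1) (a.insert b p) 0 b
    else
      getFixedLoop rest (i + 1) a p b

def getFixed (x : String) : List (Int × Int) :=
  let s := getFixedLoop x.toList 0 PySem.Dict.empty 0 0
  -- if p != 0: a[b] = p
  (if s.2.1 ≠ 0 then s.1.insert s.2.2 s.2.1 else s.1).items

-- ===== PORT B =====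
-- groupby(x): each maximal run of an equal char; record (start, length) for '#' runs
def groupRuns (cs : List Char) (i : Int) : List (Int × Int) :=
  match cs with
  | [] => []
  | c :: rest =>
    let n : Int := 1 + (rest.takeWhile (· = c)).length
    let rest' := rest.dropWhile (· = c)
    if c = '#' then (i, n) :: groupRuns rest' (i + n) else groupRuns rest' (i + n)
termination_by cs.length
decreasing_by
  all_goals
    have h := List.length_dropWhile_le (fun x => decide (x = c)) rest
    simp only [List.length_cons]
    omega

def getFixed_alt (x : String) : List (Int × Int) := groupRuns x.toList 0

-- ===== PRECONDITION & SPEC =====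
def Spec_getFixed (x : String) (out : List (Int × Int)) : Prop := out = getFixed_alt x
instance (x : String) (out : List (Int × Int)) : Decidable (Spec_getFixed x out) := by unfold Spec_getFixed; infer_instance

-- ===== CLAIM (what is proved, stated in full; the proofs are below) =====
def Claim_equal_getFixed : Prop := ∀ (x : String), Dom_getFixed x → Spec_getFixed x (getFixed x)

-- ===== LEMMAS AND PROOFS =====

-- applying the loop-final 'if p != 0: a[b] = p' and taking items
def finishA (s : PySem.Dict Int Int × Int × Int) : List (Int × Int) :=
  (if s.2.1 ≠ 0 then s.1.insert s.2.2 s.2.1 else s.1).items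

theorem fresh_not_contains (a : PySem.Dict Int Int) (k : Int) (h : ∀ k' ∈ a.keys, k' < k) :
    a.contains k = false := by
  rw [PySem.Dict.contains_eq_decide_mem_keys]
  simp only [decide_eq_false_iff_not]
  intro hk
  exact absurd (h k hk) (lt_irrefl k)

-- skipping a non-'#' char one position at a time equals the group skip
theorem groupRuns_skip (c : Char) (cs : List Char) (i : Int) (h : c ≠ '#') :
    groupRuns (c :: cs) i = groupRuns cs (i + 1) := by
  cases cs with
  | nil => simp [groupRuns, h]
  | cons d cs' =>
    by_cases hd : d = c
    · subst hd
      rw [groupRuns, groupRuns]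
      simp only [List.takeWhile, List.dropWhile, decide_true, if_neg h]
      congr 1
      push_cast [List.length_cons]
      omega
    · rw [groupRuns]
      simp only [List.takeWhile_cons, List.dropWhile_cons, decide_eq_true_eq, if_neg hd,
        if_neg h]
      simp

-- the joint invariant: P0 (between runs, p = 0) and P1 (inside an open run started at b)
theorem loop_invariant (cs : List Char) : ∀ (i b : Int) (a : PySem.Dict Int Int),
    ((∀ k ∈ a.keys, k < i) →
      finishA (getFixedLoop cs i a 0 b) = a.items ++ groupRuns cs i)
    ∧ (∀ p : Int, 0 < p → (∀ k ∈ a.keys, k < b) → b < i →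
      finishA (getFixedLoop cs i a p b) =
        a.items ++ (b, p + ((cs.takeWhile (· = '#')).length : Int)) ::
          groupRuns (cs.dropWhile (· = '#')) (i + (cs.takeWhile (· = '#')).length)) := by
  induction cs with
  | nil =>
    intro i b a
    constructor
    · intro _
      simp [getFixedLoop, groupRuns, finishA]
    · intro p hp hk _
      simp only [getFixedLoop, List.takeWhile_nil, List.dropWhile_nil, groupRuns, finishA]
      rw [if_pos (by omega : p ≠ 0),
        PySem.Dict.items_insert_of_not_contains a p (fresh_not_contains a b hk)]
      simp
  | cons c cs ih =>
    intro i b a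
    by_cases hc : c = '#'
    · subst hc
      constructor
      · intro hk
        rw [getFixedLoop, if_pos rfl, if_pos rfl]
        rw [(ih (i + 1) i a).2 (0 + 1) (by omega) hk (by omega), groupRuns]
        rw [if_pos rfl]
        push_cast
        ring_nf
      · intro p hp hk hb
        rw [getFixedLoop, if_pos rfl, if_neg (by omega : ¬ p = 0)]
        rw [(ih (i + 1) b a).2 (p + 1) (by omega) hk (by omega)]
        simp only [List.takeWhile, List.dropWhile, decide_true, List.length_cons]
        push_cast
        ring_nf
    · constructor
      · intro hk
        rw [getFixedLoop, if_neg hc, if_neg (by simp)]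
        rw [(ih (i + 1) b a).1 (by intro k hk'; have := hk k hk'; omega)]
        rw [groupRuns_skip c cs i hc]
      · intro p hp hk hb
        rw [getFixedLoop, if_neg hc, if_pos (by omega : p ≠ 0)]
        have hk' : ∀ k ∈ (a.insert b p).keys, k < i + 1 := by
          rw [PySem.Dict.keys_insert_of_not_contains a p (fresh_not_contains a b hk)]
          intro k hkm
          rcases List.mem_append.mp hkm with h1 | h1
          · have := hk k h1; omega
          · simp at h1; omega
        rw [(ih (i + 1) b (a.insert b p)).1 hk',
          PySem.Dict.items_insert_of_not_contains a p (fresh_not_contains a b hk)]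
        simp only [List.takeWhile_cons, List.dropWhile_cons, decide_eq_true_eq, if_neg hc,
          List.length_nil, Nat.cast_zero, add_zero]
        rw [groupRuns_skip c cs i hc]
        simp

-- ===== VERDICT (by name: the statement is the Claim_ definition above) =====
theorem getFixed_spec : Claim_equal_getFixed := by
  intro x _
  unfold Spec_getFixed getFixed getFixed_alt
  have h := (loop_invariant x.toList 0 0 PySem.Dict.empty).1 (by simp)
  simpa [finishA] using h
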